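-- pv_equiv track=rewrite | github.com/tjkendev/procon-library | python/graph/dreyfus-wagner.py | minimum_steiner_tree
-- ===== SOURCE A (Python) =====
-- INF = 10**9
--
-- def minimum_steiner_tree(N, G, L, V):
--     E = [[INF]*N for i in range(N)]
--     for v in range(N):
--         for w, d in G[v]:
--             E[v][w] = d
--         E[v][v] = 0
--
--     for k in range(N):
--         Ek = E[k]
--         for Ei in E:
--             v = Ei[k]
--             Ei[:] = (min(a, v + b) for a, b in zip(Ei, Ek))
--
--     S = [[INF]*(1 << L) for i in range(N)]
--     for i in range(L):
--         state = (1 << i)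
--         for v in range(N):
--             S[v][state] = E[v][V[i]]
--         S[V[i]][state] = 0
--     for i in range(N):
--         S[i][0] = 0
--
--     def gen(state):
--         s0 = (state - 1) & state
--         while s0 != state:
--             if s0 < state:
--                 yield s0
--             s0 = (s0 - 1) & state
--
--     us = [INF]*N
--     infs = [INF]*N
--     for state in range(1, 1 << L):
--         ss = list(gen(state))
--         us[:] = infs
--         for v in range(N):
--             Sv = S[v]
--             u = min(Sv[s0] + Sv[s0 ^ state] for s0 in ss)
--             us[:] = (min(a, b + u) for a, b in zip(us, E[v]))
--         for w in range(N):
--             S[w][state] = us[w]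
--
--     ALL = (1 << L) - 1
--     return min(S[v][ALL] for v in range(N))
--
-- N = 5
--
-- G = [
--     [(1, 1), (2, 2), (3, 7)],
--     [(0, 1), (3, 4)],
--     [(0, 2), (3, 2)],
--     [(0, 7), (1, 4), (2, 2), (4, 1)],
--     [(3, 1)],
-- ]
--
-- L = 2
--
-- V = [0, 3]
-- ===== SOURCE B (Python) =====
-- INF = 10**9
--
-- def minimum_steiner_tree(N, G, L, V):
--     # all-pairs shortest distances (Floyd-Warshall, rows rebuilt, same order as A)
--     E = []
--     for v in range(N):
--         row = [INF] * N
--         for w, d in G[v]: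
--             row[w] = d
--         row[v] = 0
--         E.append(row)
--     for k in range(N):
--         for i in range(N):
--             vik = E[i][k]
--             Ek = E[k]
--             E[i] = [min(a, vik + b) for a, b in zip(E[i], Ek)]
--
--     singles = [1 << i for i in range(L)]
--
--     def base(v, state):
--         # value of an untouched DP cell: a freshly initialised singleton column, or INF
--         if state in singles:
--             i = singles.index(state)
--             return 0 if v == V[i] else E[v][V[i]]
--         return INF
--
--     usub = {}
--
--     def u(v, state):
--         key = (v, state)
--         if key not in usub:
--             best = base(v, state)
--             s0 = (state - 1) & state
--             while s0:
--                 best = min(best, S(v, s0) + S(v, state - s0))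
--                 s0 = (s0 - 1) & state
--             usub[key] = best
--         return usub[key]
--
--     memo = {}
--
--     def S(w, state):
--         # minimum Steiner cost of connecting terminal set `state` to vertex w,
--         # computed top-down with memoisation instead of A's bottom-up table
--         if state == 0:
--             return 0
--         key = (w, state)
--         if key not in memo:
--             best = INF
--             for v in range(N):
--                 best = min(best, E[v][w] + u(v, state))
--             memo[key] = best
--         return memo[key]
--
--     ALL = (1 << L) - 1
--     return min(S(v, ALL) for v in range(N))
-- ===== Notes on version B (the rewrite author's own statement) =====
-- stated objective: alternative
-- what changed: The bottom-up Dreyfus-Wagner table (mutated state column by state column, with the s0=0 submask trick reading the previous value of the column and a scratch 'us' vector rebuilt by generator slice-assignment) is replaced by a top-down memoized recursion S(w,state)/u(v,state) whose base cases are a function of the state, enumerating only nonzero proper submasks and pairing s0 with state-s0; the answer is min over S(v,ALL).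
-- outside the precondition, e.g. on minimum_steiner_tree(2, [[(1, 3)], [(0, 3)]], 1, [-1]): A returns 0, B returns 0
import Mathlib
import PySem

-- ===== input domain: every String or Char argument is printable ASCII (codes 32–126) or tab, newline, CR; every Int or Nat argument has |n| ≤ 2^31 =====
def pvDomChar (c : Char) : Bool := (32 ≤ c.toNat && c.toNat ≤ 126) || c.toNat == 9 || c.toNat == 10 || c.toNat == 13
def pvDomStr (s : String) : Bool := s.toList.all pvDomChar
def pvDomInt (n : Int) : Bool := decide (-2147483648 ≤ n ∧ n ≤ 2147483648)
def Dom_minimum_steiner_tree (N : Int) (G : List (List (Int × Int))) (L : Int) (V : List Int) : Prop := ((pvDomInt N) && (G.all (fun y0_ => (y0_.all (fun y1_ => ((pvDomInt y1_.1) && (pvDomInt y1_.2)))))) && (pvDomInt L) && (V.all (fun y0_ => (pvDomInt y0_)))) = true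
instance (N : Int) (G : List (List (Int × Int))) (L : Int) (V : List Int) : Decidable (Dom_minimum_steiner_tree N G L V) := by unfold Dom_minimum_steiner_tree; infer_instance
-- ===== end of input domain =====

-- B replaces A's bottom-up Dreyfus-Wagner table (column-by-column mutation with a scratch
-- vector and the s0 = 0 submask trick) by a top-down memoized recursion on the terminal
-- subset; the all-pairs distance phase is the same Floyd-Warshall in both sources (objective: alternative).

-- ===== PORT A =====
def pvINF : Int := 10^9

-- row v of the initial weight matrix: INF everywhere, then the edges of G[v], then 0 on the diagonal
-- Python's row[w] = d for -n ≤ w < n (negative targets wrap, exactly as in both sources)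
def pvInitRow (n : Nat) (adj : List (Int × Int)) (v : Nat) : List Int :=
  ((adj.foldl (fun row wd =>
      row.set (if wd.1 < 0 then ((n : Int) + wd.1).toNat else wd.1.toNat) wd.2)
    (List.replicate n pvINF)).set v 0)

-- the in-place Floyd-Warshall triple loop (identical in both Python sources)
def pvFW (n : Nat) (E0 : List (List Int)) : List (List Int) :=
  (List.range n).foldl (fun E k =>
    (List.range n).foldl (fun E i =>
      let Ei := E.getD i []
      let Ek := E.getD k []
      let vik := Ei.getD k 0
      E.set i (List.zipWith (fun a b => min a (vik + b)) Ei Ek)) E) E0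

-- Python's min(nonempty iterable); [] never occurs on admitted inputs (N ≥ 1)
def pyminL (l : List Int) : Int :=
  match l with
  | [] => 0
  | a :: t => t.foldl min a

-- A's generator gen(state): all proper submasks of state, descending, ending with 0
-- (the always-true 's0 < state' guard of the while body is dropped: every yielded s0 is a
-- proper submask of state, hence < state)
def pvGen (state : Nat) (s0 : Nat) : List Nat :=
  if s0 = 0 then [0] else s0 :: pvGen state ((s0 - 1) &&& state)
termination_by s0
decreasing_by
  have h1 : (s0 - 1) &&& state ≤ s0 - 1 := Nat.and_le_left
  omega

-- literal transliteration of A (indices are in range on Pre_, so list indexing is getD/set)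
def minimum_steiner_tree (N : Int) (G : List (List (Int × Int))) (L : Int) (V : List Int) : Int :=
  let n := N.toNat
  let l := L.toNat
  let E := pvFW n ((List.range n).map (fun v => pvInitRow n (G.getD v []) v))
  let S0 : List (List Int) := (List.range n).map (fun _ => List.replicate (2^l) pvINF)
  let S1 := (List.range l).foldl (fun S i =>
      let state := 2^i
      let S' := (List.range n).foldl (fun S v =>
          S.set v ((S.getD v []).set state ((E.getD v []).getD (V.getD i 0).toNat 0))) S
      S'.set (V.getD i 0).toNat ((S'.getD (V.getD i 0).toNat []).set state 0)) S0
  let S2 := (List.range n).foldl (fun S i => S.set i ((S.getD i []).set 0 0)) S1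
  let Sf := (List.range' 1 (2^l - 1)).foldl (fun S state =>
      let ss := pvGen state ((state - 1) &&& state)
      let us := (List.range n).foldl (fun us v =>
          let Sv := S.getD v []
          let u := pyminL (ss.map (fun s0 => Sv.getD s0 0 + Sv.getD (s0 ^^^ state) 0))
          List.zipWith (fun a b => min a (b + u)) us (E.getD v [])) (List.replicate n pvINF)
      (List.range n).foldl (fun S w => S.set w ((S.getD w []).set state (us.getD w 0))) S) S2
  pyminL ((List.range n).map (fun v => (Sf.getD v []).getD (2^l - 1) 0))

-- ===== PORT B =====
-- B's descending enumeration of the NONZERO proper submasks of state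
def pvSubs (state : Nat) (s0 : Nat) : List Nat :=
  if s0 = 0 then [] else s0 :: pvSubs state ((s0 - 1) &&& state)
termination_by s0
decreasing_by
  have h1 : (s0 - 1) &&& state ≤ s0 - 1 := Nat.and_le_left
  omega

def pvSingles (l : Nat) : List Nat := (List.range l).map (fun i => 2^i)

-- B's base(v, state): a freshly initialised singleton column, or INF
def pvBase (l : Nat) (E : List (List Int)) (V : List Int) (v state : Nat) : Int :=
  if state ∈ pvSingles l then
    match PySem.List.index? (pvSingles l) state with
    | some i => if (v : Int) = V.getD i 0 then 0 else (E.getD v []).getD (V.getD i 0).toNat 0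
    | none => pvINF
  else pvINF

theorem pvSubs_sub : ∀ s0 state x, s0 &&& state = s0 → x ∈ pvSubs state s0 →
    x ≠ 0 ∧ x ≤ s0 ∧ x &&& state = x := by
  intro s0
  induction s0 using Nat.strong_induction_on with
  | _ s0 ih =>
    intro state x hsub hx
    rw [pvSubs] at hx
    split at hx
    · simp at hx
    · rename_i hs0
      rcases List.mem_cons.mp hx with h | h
      · subst h; exact ⟨hs0, le_refl _, hsub⟩
      · have hle : (s0 - 1) &&& state ≤ s0 - 1 := Nat.and_le_left
        have hsub' : ((s0 - 1) &&& state) &&& state = (s0 - 1) &&& state := by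
          rw [Nat.and_assoc, Nat.and_self]
        have := ih ((s0 - 1) &&& state) (by omega) state x hsub' h
        exact ⟨this.1, by omega, this.2.2⟩

-- facts the recursion below needs for termination
theorem pvSubs_start (state x : Nat) (hx : x ∈ pvSubs state ((state - 1) &&& state)) :
    x < state ∧ state - x < state ∧ x &&& state = x ∧ x ≠ 0 := by
  by_cases h0 : state = 0
  · subst h0; rw [pvSubs] at hx; simp at hx
  · have hsub : ((state - 1) &&& state) &&& state = (state - 1) &&& state := by
      rw [Nat.and_assoc, Nat.and_self]
    have h := pvSubs_sub _ _ _ hsub hx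
    have hle : (state - 1) &&& state ≤ state - 1 := Nat.and_le_left
    exact ⟨by omega, by omega, h.2.2, h.1⟩

mutual
-- B's u(v, state): best split of `state` into two nonempty halves, seeded with base(v, state)
def pvU (n : Nat) (E : List (List Int)) (l : Nat) (V : List Int) (v state : Nat) : Int :=
  (pvSubs state ((state - 1) &&& state)).attach.foldl
    (fun best s0 => min best (pvS n E l V v s0.1 + pvS n E l V v (state - s0.1)))
    (pvBase l E V v state)
termination_by (state, 0)
decreasing_by
  · exact Prod.Lex.left _ _ (pvSubs_start state s0.1 s0.2).1
  · exact Prod.Lex.left _ _ (pvSubs_start state s0.1 s0.2).2.1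

-- B's S(w, state): connect terminal set `state` to w through the best attachment vertex v
def pvS (n : Nat) (E : List (List Int)) (l : Nat) (V : List Int) (w state : Nat) : Int :=
  if state = 0 then 0 else
    (List.range n).foldl
      (fun best v => min best ((E.getD v []).getD w 0 + pvU n E l V v state)) pvINF
termination_by (state, 1)
decreasing_by
  exact Prod.Lex.right' _ (le_refl _) (by omega)
end

def minimum_steiner_tree_alt (N : Int) (G : List (List (Int × Int))) (L : Int) (V : List Int) : Int :=
  let n := N.toNat
  let l := L.toNat
  let E := pvFW n ((List.range n).map (fun v => pvInitRow n (G.getD v []) v))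
  pyminL ((List.range n).map (fun v => pvS n E l V v (2^l - 1)))

-- ===== PRECONDITION & SPEC =====
-- Pre_ excludes: N ≤ 0 (A's final min() raises ValueError), a graph list shorter than N
-- (IndexError), fewer than L terminals (IndexError), edge targets outside [-N, N)
-- (IndexError), and negative terminal labels in V (outside the natural 0..N-1 vertex
-- domain: A wraps them Python-style, an accident of its table indexing).
def Pre_minimum_steiner_tree (N : Int) (G : List (List (Int × Int))) (L : Int) (V : List Int) : Prop :=
  1 ≤ N ∧ 0 ≤ L ∧ N.toNat ≤ G.length ∧
  (∀ v < N.toNat, ∀ wd ∈ G.getD v [], -N ≤ wd.1 ∧ wd.1 < N) ∧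
  L.toNat ≤ V.length ∧ (∀ i < L.toNat, 0 ≤ V.getD i 0 ∧ V.getD i 0 < N)
instance (N : Int) (G : List (List (Int × Int))) (L : Int) (V : List Int) : Decidable (Pre_minimum_steiner_tree N G L V) := by unfold Pre_minimum_steiner_tree; infer_instance

def pvWitness_minimum_steiner_tree : Int × (List (List (Int × Int))) × Int × List Int :=
  (5, [[(1, 1), (2, 2), (3, 7)], [(0, 1), (3, 4)], [(0, 2), (3, 2)], [(0, 7), (1, 4), (2, 2), (4, 1)], [(3, 1)]], 2, [0, 3])

def Spec_minimum_steiner_tree (N : Int) (G : List (List (Int × Int))) (L : Int) (V : List Int) (out : Int) : Prop := out = minimum_steiner_tree_alt N G L V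
instance (N : Int) (G : List (List (Int × Int))) (L : Int) (V : List Int) (out : Int) : Decidable (Spec_minimum_steiner_tree N G L V out) := by unfold Spec_minimum_steiner_tree; infer_instance

-- ===== CLAIM (what is proved, stated in full; the proofs are below) =====
def Claim_equal_minimum_steiner_tree : Prop := ∀ (N : Int) (G : List (List (Int × Int))) (L : Int) (V : List Int), Dom_minimum_steiner_tree N G L V → Pre_minimum_steiner_tree N G L V → Spec_minimum_steiner_tree N G L V (minimum_steiner_tree N G L V)

-- ===== LEMMAS AND PROOFS =====

-- ---- bit arithmetic ----
theorem pvXorAdd : ∀ (x y : Nat), x &&& y = 0 → x ^^^ y = x + y := by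
  intro x
  induction x using Nat.binaryRec with
  | zero => simp
  | bit b m ih =>
    intro y h
    rw [← Nat.bit_testBit_zero_shiftRight_one y] at h ⊢
    rw [Nat.land_bit] at h
    rw [Nat.xor_bit]
    rw [Nat.bit_eq_zero_iff] at h
    rw [Nat.bit_val, Nat.bit_val, Nat.bit_val, ih _ h.1]
    cases b <;> cases hy : y.testBit 0 <;> simp_all <;> omega

theorem pvSubmaskXor (a b : Nat) (h : a &&& b = a) : b ^^^ a = b - a := by
  have hd : (b ^^^ a) &&& a = 0 := by
    have h2 : (b ^^^ a) &&& a = (b &&& a) ^^^ (a &&& a) := @Nat.and_xor_distrib_right b a a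
    rw [h2, Nat.and_self, Nat.and_comm b a, h, Nat.xor_self]
  have hs : (b ^^^ a) + a = b := by
    rw [← pvXorAdd _ _ hd, Nat.xor_xor_cancel_right]
  omega

-- ---- A's generator vs B's submask list ----
theorem pvGen_eq_subs : ∀ s0 state, pvGen state s0 = pvSubs state s0 ++ [0] := by
  intro s0
  induction s0 using Nat.strong_induction_on with
  | _ s0 ih =>
    intro state
    rw [pvGen, pvSubs]
    split
    · simp
    · rename_i h
      have h1 : (s0 - 1) &&& state ≤ s0 - 1 := Nat.and_le_left
      rw [ih _ (by omega)]
      simp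

-- ---- min-fold bookkeeping (Python min of a nonempty sequence) ----
theorem pvFoldlMin_comm (t : List Int) : ∀ x a, t.foldl min (min x a) = min (t.foldl min x) a := by
  induction t with
  | nil => intro x a; rfl
  | cons y t ih =>
    intro x a
    simp only [List.foldl_cons]
    rw [min_right_comm x a y, ih]

theorem pyminL_concat (xs : List Int) (a : Int) : pyminL (xs ++ [a]) = xs.foldl min a := by
  cases xs with
  | nil => rfl
  | cons x t =>
    simp only [pyminL, List.cons_append, List.foldl_append, List.foldl_cons, List.foldl_nil]
    rw [min_comm a x, pvFoldlMin_comm]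

-- ---- generic fold invariant ----
theorem pvFoldInv {α β : Type} (P : α → Prop) (l : List β) (f : α → β → α) (init : α)
    (h0 : P init) (hs : ∀ a b, b ∈ l → P a → P (f a b)) : P (l.foldl f init) := by
  induction l generalizing init with
  | nil => exact h0
  | cons b t ih =>
    exact ih (f init b) (hs init b (List.mem_cons_self) h0)
      (fun a c hc ha => hs a c (List.mem_cons_of_mem _ hc) ha)

-- ---- getD/set plumbing ----
theorem pvGetD_set_self {α : Type} (xs : List α) (i : Nat) (a d : α) (h : i < xs.length) :
    (xs.set i a).getD i d = a := by
  simp [List.getD, h]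

theorem pvGetD_set_ne {α : Type} (xs : List α) (i j : Nat) (a d : α) (h : i ≠ j) :
    (xs.set i a).getD j d = xs.getD j d := by
  simp [List.getD, List.getElem?_set_ne, h]

-- ---- matrix well-formedness ----
def pvMatOK (n : Nat) (M : List (List Int)) : Prop := M.length = n ∧ ∀ r ∈ M, r.length = n

theorem pvInitRow_len (n : Nat) (adj : List (Int × Int)) (v : Nat) : (pvInitRow n adj v).length = n := by
  unfold pvInitRow
  rw [List.length_set]
  exact pvFoldInv (fun (r : List Int) => r.length = n) adj _ _ (by simp) (fun r b _ hr => by simp [hr])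

theorem pvFW_ok (n : Nat) (E0 : List (List Int)) (h : pvMatOK n E0) : pvMatOK n (pvFW n E0) := by
  unfold pvFW
  refine pvFoldInv (pvMatOK n) _ _ _ h (fun E k hk hE => ?_)
  refine pvFoldInv (pvMatOK n) _ _ _ hE (fun E i hi hE' => ?_)
  obtain ⟨hlen, hrow⟩ := hE'
  have hi' : i < n := List.mem_range.mp hi
  have hk' : k < n := List.mem_range.mp hk
  have hiE : i < E.length := by rw [hlen]; exact hi'
  have hkE : k < E.length := by rw [hlen]; exact hk'
  have hEi : (E.getD i []).length = n := by
    rw [List.getD_eq_getElem _ _ hiE]; exact hrow _ (List.getElem_mem hiE)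
  have hEk : (E.getD k []).length = n := by
    rw [List.getD_eq_getElem _ _ hkE]; exact hrow _ (List.getElem_mem hkE)
  constructor
  · simp [hlen]
  · intro r hr
    rcases List.mem_or_eq_of_mem_set hr with h' | h'
    · exact hrow r h'
    · subst h'; rw [List.length_zipWith, hEi, hEk, Nat.min_self]

theorem pvDist_ok (N : Int) (G : List (List (Int × Int))) :
    pvMatOK N.toNat (pvFW N.toNat ((List.range N.toNat).map (fun v => pvInitRow N.toNat (G.getD v []) v))) := by
  apply pvFW_ok
  constructor
  · simp
  · intro r hr
    rcases List.mem_map.mp hr with ⟨v, _, hv⟩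
    exact hv ▸ pvInitRow_len _ _ _

-- ---- table access and well-formedness ----
def pvGetS (S : List (List Int)) (v s : Nat) : Int := (S.getD v []).getD s 0

def pvTOK (n l : Nat) (S : List (List Int)) : Prop := S.length = n ∧ ∀ r ∈ S, r.length = 2^l

theorem pvTOK_row (n l : Nat) (S : List (List Int)) (h : pvTOK n l S) (v : Nat) (hv : v < n) :
    (S.getD v []).length = 2^l := by
  have hv' : v < S.length := by rw [h.1]; exact hv
  rw [List.getD_eq_getElem _ _ hv']
  exact h.2 _ (List.getElem_mem hv')

-- writing one column: S := fold over vs of  S.set w ((S.getD w []).set st (val w))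
theorem pvSetCol (n l : Nat) (st : Nat) (val : Nat → Int) (hst : st < 2^l) :
    ∀ (vs : List Nat) (S : List (List Int)), (∀ w ∈ vs, w < n) → pvTOK n l S →
    pvTOK n l (vs.foldl (fun S w => S.set w ((S.getD w []).set st (val w))) S) ∧
    (∀ v s, v < n → s < 2^l →
      pvGetS (vs.foldl (fun S w => S.set w ((S.getD w []).set st (val w))) S) v s =
        if v ∈ vs ∧ s = st then val v else pvGetS S v s) := by
  intro vs
  induction vs with
  | nil => intro S _ hS; exact ⟨hS, fun v s _ _ => by simp⟩
  | cons w ws ih =>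
    intro S hvs hS
    have hw : w < n := hvs w List.mem_cons_self
    set S' := S.set w ((S.getD w []).set st (val w)) with hS'def
    have hS' : pvTOK n l S' := by
      constructor
      · simp [hS'def, hS.1]
      · intro r hr
        rcases List.mem_or_eq_of_mem_set hr with h' | h'
        · exact hS.2 r h'
        · subst h'; rw [List.length_set]; exact pvTOK_row n l S hS w hw
    have := ih S' (fun x hx => hvs x (List.mem_cons_of_mem _ hx)) hS'
    refine ⟨this.1, fun v s hv hs => ?_⟩
    simp only [List.foldl_cons]
    rw [(this.2 v s hv hs)]
    by_cases hmem : v ∈ ws ∧ s = st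
    · simp [hmem, List.mem_cons]
    · simp only [hmem, if_false]
      by_cases hvw : v = w
      · subst hvw
        by_cases hsst : s = st
        · subst hsst
          rw [if_pos ⟨List.mem_cons_self, rfl⟩]
          unfold pvGetS
          rw [hS'def, pvGetD_set_self _ _ _ _ (by rw [hS.1]; exact hw),
            pvGetD_set_self _ _ _ _ (by rw [pvTOK_row n l S hS v hw]; exact hst)]
        · rw [if_neg (fun hc => hsst hc.2)]
          unfold pvGetS
          rw [hS'def, pvGetD_set_self _ _ _ _ (by rw [hS.1]; exact hw),
            pvGetD_set_ne _ _ _ _ _ (fun h => hsst h.symm)]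
      · rw [if_neg (fun hc => hmem ⟨(List.mem_cons.mp hc.1).resolve_left hvw, hc.2⟩)]
        unfold pvGetS
        rw [hS'def, pvGetD_set_ne _ _ _ _ _ (fun h => hvw h.symm)]

-- ---- proof-layer names for the pieces of A's computation (definitionally equal to the port) ----
def pvE (N : Int) (G : List (List (Int × Int))) : List (List Int) :=
  pvFW N.toNat ((List.range N.toNat).map (fun v => pvInitRow N.toNat (G.getD v []) v))

def pvUsExpr (n : Nat) (E : List (List Int)) (S : List (List Int)) (state : Nat) : List Int :=
  (List.range n).foldl (fun us v =>
    List.zipWith (fun a b => min a (b +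
      pyminL ((pvGen state ((state - 1) &&& state)).map
        (fun s0 => (S.getD v []).getD s0 0 + (S.getD v []).getD (s0 ^^^ state) 0)))) us (E.getD v []))
    (List.replicate n pvINF)

def pvStateStep (n : Nat) (E : List (List Int)) (S : List (List Int)) (state : Nat) : List (List Int) :=
  (List.range n).foldl (fun S' w => S'.set w ((S'.getD w []).set state ((pvUsExpr n E S state).getD w 0))) S

def pvInitStepD (n : Nat) (E : List (List Int)) (V : List Int) (S : List (List Int)) (i : Nat) : List (List Int) :=
  let S' := (List.range n).foldl (fun S v =>
      S.set v ((S.getD v []).set (2^i) ((E.getD v []).getD (V.getD i 0).toNat 0))) S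
  S'.set (V.getD i 0).toNat ((S'.getD (V.getD i 0).toNat []).set (2^i) 0)

def pvS2e (n l : Nat) (E : List (List Int)) (V : List Int) : List (List Int) :=
  (List.range n).foldl (fun S i => S.set i ((S.getD i []).set 0 0))
    ((List.range l).foldl (pvInitStepD n E V)
      ((List.range n).map (fun _ => List.replicate (2^l) pvINF)))

-- ---- the DP target: what each cell of A's table must equal ----
def pvTarget (n : Nat) (E : List (List Int)) (l : Nat) (V : List Int) (t v s : Nat) : Int :=
  if s = 0 then 0 else if s ≤ t then pvS n E l V v s else pvBase l E V v s

-- ---- the singleton list and B's base function ----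
theorem pvSingles_index (l i : Nat) (hi : i < l) :
    PySem.List.index? (pvSingles l) (2^i) = some i := by
  rw [PySem.List.index?_eq_some_iff]
  refine ⟨(List.range i).map (fun j => 2^j), (List.range' (i+1) (l-i-1)).map (fun j => 2^j), ?_, by simp, ?_⟩
  · unfold pvSingles
    have hsplit : List.range l = List.range i ++ List.range' i (l - i) := by
      rw [List.range_eq_range', List.range_eq_range']
      rw [show List.range' 0 i ++ List.range' i (l - i) = List.range' 0 i ++ List.range' (0 + 1 * i) (l - i) by simp]
      rw [List.range'_append]
      congr 1
      omega
    rw [hsplit, List.map_append]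
    congr 1
    rw [show l - i = (l - i - 1) + 1 by omega, List.range'_succ]
    simp
  · intro hmem
    rcases List.mem_map.mp hmem with ⟨j, hj, hej⟩
    have hji : j = i := Nat.pow_right_injective (le_refl 2) hej
    exact absurd (hji ▸ hj) (by simp)

theorem pvBase_single (l : Nat) (E : List (List Int)) (V : List Int) (v i : Nat) (hi : i < l) :
    pvBase l E V v (2^i) =
      if (v : Int) = V.getD i 0 then 0 else (E.getD v []).getD (V.getD i 0).toNat 0 := by
  have hmem : (2^i) ∈ pvSingles l := List.mem_map.mpr ⟨i, List.mem_range.mpr hi, rfl⟩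
  unfold pvBase
  rw [if_pos hmem, pvSingles_index l i hi]

theorem pvBase_not_single (l : Nat) (E : List (List Int)) (V : List Int) (v s : Nat)
    (h : ¬ ∃ i, i < l ∧ s = 2^i) : pvBase l E V v s = pvINF := by
  have : s ∉ pvSingles l := by
    intro hm
    rcases List.mem_map.mp hm with ⟨i, hi, hs⟩
    exact h ⟨i, List.mem_range.mp hi, hs.symm⟩
  unfold pvBase
  rw [if_neg this]

-- ---- A's u at one vertex equals B's recursion ----
theorem pvU_char (n l : Nat) (E : List (List Int)) (V : List Int) (state : Nat)
    (h1 : 1 ≤ state) (h2 : state < 2^l) (S : List (List Int)) (v : Nat) (hv : v < n)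
    (hinv : ∀ v s, v < n → s < 2^l → pvGetS S v s = pvTarget n E l V (state - 1) v s) :
    pyminL ((pvGen state ((state - 1) &&& state)).map
      (fun s0 => (S.getD v []).getD s0 0 + (S.getD v []).getD (s0 ^^^ state) 0)) =
    pvU n E l V v state := by
  have hf0 : (S.getD v []).getD 0 0 + (S.getD v []).getD ((0:Nat) ^^^ state) 0
      = pvBase l E V v state := by
    rw [Nat.zero_xor]
    have e1 : pvGetS S v 0 = 0 := by
      rw [hinv v 0 hv (Nat.two_pow_pos l)]; unfold pvTarget; simp
    have e2 : pvGetS S v state = pvBase l E V v state := by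
      rw [hinv v state hv h2]; unfold pvTarget
      rw [if_neg (by omega), if_neg (by omega)]
    unfold pvGetS at e1 e2
    rw [e1, e2, zero_add]
  have hmap : (pvSubs state ((state - 1) &&& state)).map
      (fun s0 => (S.getD v []).getD s0 0 + (S.getD v []).getD (s0 ^^^ state) 0) =
      (pvSubs state ((state - 1) &&& state)).map
      (fun s0 => pvS n E l V v s0 + pvS n E l V v (state - s0)) := by
    apply List.map_congr_left
    intro s0 hs0
    obtain ⟨hlt, hsub2, hand, hne⟩ := pvSubs_start state s0 hs0
    have hxor : s0 ^^^ state = state - s0 := by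
      rw [Nat.xor_comm]; exact pvSubmaskXor s0 state hand
    have e1 : pvGetS S v s0 = pvS n E l V v s0 := by
      rw [hinv v s0 hv (by omega)]; unfold pvTarget
      rw [if_neg hne, if_pos (by omega)]
    have e2 : pvGetS S v (state - s0) = pvS n E l V v (state - s0) := by
      rw [hinv v (state - s0) hv (by omega)]; unfold pvTarget
      rw [if_neg (by omega), if_pos (by omega)]
    unfold pvGetS at e1 e2
    rw [hxor, e1, e2]
  rw [pvGen_eq_subs, List.map_append, List.map_singleton, hf0, pyminL_concat, hmap,
    pvU, List.foldl_map]
  exact (List.foldl_attach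
    (f := fun (acc : Int) (x : Nat) => min acc (pvS n E l V v x + pvS n E l V v (state - x)))
    (b := pvBase l E V v state)).symm

theorem pvUs_char (n _l : Nat) (E : List (List Int)) (hE : pvMatOK n E) (uval : Nat → Int) :
    ∀ (vs : List Nat) (us : List Int), (∀ v ∈ vs, v < n) → us.length = n →
    (vs.foldl (fun us v => List.zipWith (fun a b => min a (b + uval v)) us (E.getD v [])) us).length = n ∧
    ∀ w, w < n →
      (vs.foldl (fun us v => List.zipWith (fun a b => min a (b + uval v)) us (E.getD v [])) us).getD w 0 =
      vs.foldl (fun best v => min best ((E.getD v []).getD w 0 + uval v)) (us.getD w 0) := by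
  intro vs
  induction vs with
  | nil => intro us _ hlen; exact ⟨hlen, fun w _ => rfl⟩
  | cons v vt ih =>
    intro us h hlen
    have hv : v < n := h v List.mem_cons_self
    have hv' : v < E.length := by rw [hE.1]; exact hv
    have hrowlen : (E.getD v []).length = n := by
      rw [List.getD_eq_getElem _ _ hv']; exact hE.2 _ (List.getElem_mem hv')
    have hlen' : (List.zipWith (fun a b => min a (b + uval v)) us (E.getD v [])).length = n := by
      rw [List.length_zipWith, hlen, hrowlen, Nat.min_self]
    have hIH := ih (List.zipWith (fun a b => min a (b + uval v)) us (E.getD v []))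
      (fun x hx => h x (List.mem_cons_of_mem _ hx)) hlen'
    refine ⟨hIH.1, fun w hw => ?_⟩
    simp only [List.foldl_cons]
    rw [hIH.2 w hw]
    have hwz : w < (List.zipWith (fun a b => min a (b + uval v)) us (E.getD v [])).length := by
      rw [hlen']; exact hw
    have : (List.zipWith (fun a b => min a (b + uval v)) us (E.getD v [])).getD w 0
        = min (us.getD w 0) ((E.getD v []).getD w 0 + uval v) := by
      simp only [List.getD_eq_getElem _ _ hwz, List.getElem_zipWith,
        List.getD_eq_getElem us _ (show w < us.length by rw [hlen]; exact hw),
        List.getD_eq_getElem (E.getD v []) _ (show w < (E.getD v []).length by rw [hrowlen]; exact hw)]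
    rw [this]

-- ---- one state-processing step of A preserves the invariant ----
theorem pvStep (n l : Nat) (E : List (List Int)) (hE : pvMatOK n E) (V : List Int)
    (state : Nat) (h1 : 1 ≤ state) (h2 : state < 2^l)
    (S : List (List Int)) (hS : pvTOK n l S)
    (hinv : ∀ v s, v < n → s < 2^l → pvGetS S v s = pvTarget n E l V (state - 1) v s) :
    pvTOK n l (pvStateStep n E S state) ∧
    ∀ v s, v < n → s < 2^l →
      pvGetS (pvStateStep n E S state) v s = pvTarget n E l V state v s := by
  have huval : pvUsExpr n E S state =
      (List.range n).foldl (fun us v => List.zipWith (fun a b => min a (b +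
        (fun v => pyminL ((pvGen state ((state - 1) &&& state)).map
          (fun s0 => (S.getD v []).getD s0 0 + (S.getD v []).getD (s0 ^^^ state) 0))) v)) us (E.getD v []))
      (List.replicate n pvINF) := rfl
  have hus := pvUs_char n l E hE
      (fun v => pyminL ((pvGen state ((state - 1) &&& state)).map
        (fun s0 => (S.getD v []).getD s0 0 + (S.getD v []).getD (s0 ^^^ state) 0)))
      (List.range n) (List.replicate n pvINF)
      (fun v hv => List.mem_range.mp hv) (by simp)
  have husget : ∀ w, w < n → (pvUsExpr n E S state).getD w 0 = pvS n E l V w state := by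
    intro w hw
    rw [huval, hus.2 w hw]
    have hrep : (List.replicate n pvINF).getD w 0 = pvINF := by
      rw [List.getD_eq_getElem _ _ (by simpa using hw)]
      simp
    rw [hrep]
    have hcongr : (List.range n).foldl (fun best v => min best ((E.getD v []).getD w 0 +
        (fun v => pyminL ((pvGen state ((state - 1) &&& state)).map
          (fun s0 => (S.getD v []).getD s0 0 + (S.getD v []).getD (s0 ^^^ state) 0))) v)) pvINF
        = (List.range n).foldl (fun best v => min best ((E.getD v []).getD w 0 + pvU n E l V v state)) pvINF :=
      PySem.List.foldl_congr_mem _ _ _ _ (fun acc x hx =>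
        congrArg (fun z => min acc ((E.getD x []).getD w 0 + z))
          (pvU_char n l E V state h1 h2 S x (List.mem_range.mp hx) hinv))
    rw [hcongr, pvS, if_neg (by omega)]
  have hcols := pvSetCol n l state (fun w => (pvUsExpr n E S state).getD w 0) h2
      (List.range n) S (fun w hw => List.mem_range.mp hw) hS
  refine ⟨hcols.1, fun v s hv hs => ?_⟩
  have hrw : pvGetS (pvStateStep n E S state) v s =
      if v ∈ List.range n ∧ s = state then (pvUsExpr n E S state).getD v 0 else pvGetS S v s :=
    hcols.2 v s hv hs
  rw [hrw]
  by_cases hss : s = state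
  · subst hss
    rw [if_pos ⟨List.mem_range.mpr hv, rfl⟩, husget v hv]
    unfold pvTarget
    rw [if_neg (by omega), if_pos (le_refl _)]
  · rw [if_neg (fun hc => hss hc.2), hinv v s hv hs]
    unfold pvTarget
    by_cases h0 : s = 0
    · simp [h0]
    · rw [if_neg h0, if_neg h0]
      split_ifs with hA hB
      · rfl
      · omega
      · omega
      · rfl

-- ---- characterisation of one singleton-column initialisation step ----
theorem pvInitStep_char (n l : Nat) (E : List (List Int)) (V : List Int)
    (hVlt : ∀ i, i < l → (V.getD i 0).toNat < n)
    (i : Nat) (hi : i < l) (S : List (List Int)) (hS : pvTOK n l S) :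
    pvTOK n l (pvInitStepD n E V S i) ∧
    ∀ v s, v < n → s < 2^l →
      pvGetS (pvInitStepD n E V S i) v s =
        if s = 2^i then
          (if v = (V.getD i 0).toNat then 0 else (E.getD v []).getD (V.getD i 0).toNat 0)
        else pvGetS S v s := by
  have h2 : (2:Nat)^i < 2^l := Nat.pow_lt_pow_right (by omega) hi
  have hinner := pvSetCol n l (2^i) (fun v => (E.getD v []).getD (V.getD i 0).toNat 0) h2
      (List.range n) S (fun w hw => List.mem_range.mp hw) hS
  have houter := pvSetCol n l (2^i) (fun _ => 0) h2 [(V.getD i 0).toNat]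
      ((List.range n).foldl (fun S v =>
        S.set v ((S.getD v []).set (2^i) ((E.getD v []).getD (V.getD i 0).toNat 0))) S)
      (fun w hw => by rw [List.mem_singleton.mp hw]; exact hVlt i hi) hinner.1
  have hform : pvInitStepD n E V S i =
      [(V.getD i 0).toNat].foldl (fun S w => S.set w ((S.getD w []).set (2^i) 0))
        ((List.range n).foldl (fun S v =>
          S.set v ((S.getD v []).set (2^i) ((E.getD v []).getD (V.getD i 0).toNat 0))) S) := rfl
  rw [hform]
  refine ⟨houter.1, fun v s hv hs => ?_⟩
  rw [houter.2 v s hv hs, hinner.2 v s hv hs]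
  by_cases hss : s = 2^i
  · subst hss
    by_cases hvt : v = (V.getD i 0).toNat
    · rw [if_pos ⟨List.mem_singleton.mpr hvt, rfl⟩, if_pos rfl, if_pos hvt]
    · rw [if_neg (fun hc => hvt (List.mem_singleton.mp hc.1)),
        if_pos ⟨List.mem_range.mpr hv, rfl⟩, if_pos rfl, if_neg hvt]
  · rw [if_neg (fun hc => hss hc.2), if_neg (fun hc => hss hc.2), if_neg hss]

-- ---- the whole singleton initialisation pass ----
theorem pvInitCols (n l : Nat) (E : List (List Int)) (V : List Int)
    (hVlt : ∀ i, i < l → (V.getD i 0).toNat < n) :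
    ∀ (is : List Nat) (S : List (List Int)), (∀ i ∈ is, i < l) → is.Nodup → pvTOK n l S →
    pvTOK n l (is.foldl (pvInitStepD n E V) S) ∧
    ∀ v s, v < n → s < 2^l →
      ((∀ i ∈ is, s ≠ 2^i) → pvGetS (is.foldl (pvInitStepD n E V) S) v s = pvGetS S v s) ∧
      (∀ i ∈ is, s = 2^i → pvGetS (is.foldl (pvInitStepD n E V) S) v s =
        if v = (V.getD i 0).toNat then 0 else (E.getD v []).getD (V.getD i 0).toNat 0) := by
  intro is
  induction is with
  | nil => intro S _ _ hS; exact ⟨hS, fun v s _ _ => ⟨fun _ => rfl, fun i hi => absurd hi (by simp)⟩⟩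
  | cons i tl ih =>
    intro S hmem hnd hS
    have hi : i < l := hmem i List.mem_cons_self
    have hstep := pvInitStep_char n l E V hVlt i hi S hS
    have hIH := ih (pvInitStepD n E V S i) (fun j hj => hmem j (List.mem_cons_of_mem _ hj))
      (List.Nodup.of_cons hnd) hstep.1
    simp only [List.foldl_cons]
    refine ⟨hIH.1, fun v s hv hs => ⟨?_, ?_⟩⟩
    · intro hall
      rw [(hIH.2 v s hv hs).1 (fun j hj => hall j (List.mem_cons_of_mem _ hj)),
        hstep.2 v s hv hs, if_neg (hall i List.mem_cons_self)]
    · intro j hj hsj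
      rcases List.mem_cons.mp hj with hji | hjtl
      · subst hji
        have hnotin := (List.nodup_cons.mp hnd).1
        rw [(hIH.2 v s hv hs).1 ?_, hstep.2 v s hv hs, if_pos hsj]
        intro j' hj' hcon
        have hj'j : j' = j := Nat.pow_right_injective (le_refl 2)
          (show (2:Nat)^j' = 2^j by rw [← hcon, ← hsj])
        exact hnotin (hj'j ▸ hj')
      · exact (hIH.2 v s hv hs).2 j hjtl hsj

-- ---- the fully initialised table satisfies the t = 0 invariant ----
theorem pvInit_char (n l : Nat) (E : List (List Int)) (V : List Int)
    (hVge : ∀ i, i < l → 0 ≤ V.getD i 0)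
    (hVlt : ∀ i, i < l → (V.getD i 0).toNat < n) :
    pvTOK n l (pvS2e n l E V) ∧
    ∀ v s, v < n → s < 2^l →
      pvGetS (pvS2e n l E V) v s = pvTarget n E l V 0 v s := by
  have hS0 : pvTOK n l ((List.range n).map (fun _ => List.replicate (2^l) pvINF)) := by
    constructor
    · simp
    · intro r hr
      rcases List.mem_map.mp hr with ⟨_, _, hv⟩
      rw [← hv]; simp
  have hS0get : ∀ v s, v < n → s < 2^l →
      pvGetS ((List.range n).map (fun _ => List.replicate (2^l) pvINF)) v s = pvINF := by
    intro v s hv hs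
    unfold pvGetS
    rw [List.getD_eq_getElem _ _
      (show v < ((List.range n).map (fun _ => List.replicate (2^l) pvINF)).length by simpa using hv)]
    rw [List.getElem_map]
    rw [List.getD_eq_getElem _ _ (show s < (List.replicate (2^l) pvINF).length by simpa using hs)]
    simp
  have hcols := pvInitCols n l E V hVlt (List.range l)
      ((List.range n).map (fun _ => List.replicate (2^l) pvINF))
      (fun i hi => List.mem_range.mp hi) (List.nodup_range) hS0
  have hzero := pvSetCol n l 0 (fun _ => 0) (Nat.two_pow_pos l) (List.range n)
      ((List.range l).foldl (pvInitStepD n E V) ((List.range n).map (fun _ => List.replicate (2^l) pvINF)))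
      (fun w hw => List.mem_range.mp hw) hcols.1
  have hform : pvS2e n l E V =
      (List.range n).foldl (fun S w => S.set w ((S.getD w []).set 0 ((fun (_ : Nat) => (0:Int)) w)))
        ((List.range l).foldl (pvInitStepD n E V) ((List.range n).map (fun _ => List.replicate (2^l) pvINF))) := rfl
  rw [hform]
  refine ⟨hzero.1, fun v s hv hs => ?_⟩
  rw [hzero.2 v s hv hs]
  unfold pvTarget
  by_cases h0 : s = 0
  · subst h0
    rw [if_pos ⟨List.mem_range.mpr hv, rfl⟩, if_pos rfl]
  · rw [if_neg (fun hc => h0 hc.2), if_neg h0, if_neg (by omega)]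
    by_cases hsing : ∃ i, i < l ∧ s = 2^i
    · obtain ⟨i, hi, hsi⟩ := hsing
      rw [(hcols.2 v s hv hs).2 i (List.mem_range.mpr hi) hsi, hsi, pvBase_single l E V v i hi]
      have hge := hVge i hi
      by_cases hveq : v = (V.getD i 0).toNat
      · rw [if_pos hveq, if_pos (by omega)]
      · rw [if_neg hveq, if_neg (by omega)]
    · rw [(hcols.2 v s hv hs).1 ?_, hS0get v s hv hs, pvBase_not_single l E V v s hsing]
      intro i hi hcon
      exact hsing ⟨i, List.mem_range.mp hi, hcon⟩

-- ===== VERDICT (by name: the statement is the Claim_ definition above) =====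
theorem minimum_steiner_tree_spec : Claim_equal_minimum_steiner_tree := by
  unfold Claim_equal_minimum_steiner_tree
  intro N G L V hdom hpre
  unfold Spec_minimum_steiner_tree
  obtain ⟨hN, hL, hGlen, hGedges, hVlen, hVr⟩ := hpre
  have hE : pvMatOK N.toNat (pvE N G) := pvDist_ok N G
  have hVge : ∀ i, i < L.toNat → 0 ≤ V.getD i 0 := fun i hi => (hVr i hi).1
  have hVlt : ∀ i, i < L.toNat → (V.getD i 0).toNat < N.toNat := by
    intro i hi
    have := hVr i hi
    omega
  have hA : minimum_steiner_tree N G L V =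
      pyminL ((List.range N.toNat).map (fun v =>
        (((List.range' 1 (2^L.toNat - 1)).foldl (pvStateStep N.toNat (pvE N G))
          (pvS2e N.toNat L.toNat (pvE N G) V)).getD v []).getD (2^L.toNat - 1) 0)) := rfl
  have hB : minimum_steiner_tree_alt N G L V =
      pyminL ((List.range N.toNat).map (fun v =>
        pvS N.toNat (pvE N G) L.toNat V v (2^L.toNat - 1))) := rfl
  rw [hA, hB]
  have h2p : 1 ≤ 2^L.toNat := Nat.one_le_two_pow
  have hinv : ∀ m, m ≤ 2^L.toNat - 1 →
      pvTOK N.toNat L.toNat ((List.range' 1 m).foldl (pvStateStep N.toNat (pvE N G))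
        (pvS2e N.toNat L.toNat (pvE N G) V)) ∧
      ∀ v s, v < N.toNat → s < 2^L.toNat →
        pvGetS ((List.range' 1 m).foldl (pvStateStep N.toNat (pvE N G))
          (pvS2e N.toNat L.toNat (pvE N G) V)) v s = pvTarget N.toNat (pvE N G) L.toNat V m v s := by
    intro m
    induction m with
    | zero =>
      intro _
      exact pvInit_char N.toNat L.toNat (pvE N G) V hVge hVlt
    | succ m ih =>
      intro hm
      have hprev := ih (by omega)
      rw [List.range'_concat, List.foldl_append, List.foldl_cons, List.foldl_nil]
      rw [show 1 + 1 * m = m + 1 by omega]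
      have hstep := pvStep N.toNat L.toNat (pvE N G) hE V (m + 1) (by omega) (by omega)
        ((List.range' 1 m).foldl (pvStateStep N.toNat (pvE N G)) (pvS2e N.toNat L.toNat (pvE N G) V))
        hprev.1
        (fun v s hv hs => by rw [hprev.2 v s hv hs, show m + 1 - 1 = m by omega])
      exact hstep
  have hfin := hinv (2^L.toNat - 1) (le_refl _)
  refine congrArg pyminL (List.map_congr_left fun v hv => ?_)
  have hv' := List.mem_range.mp hv
  have hgoal := hfin.2 v (2^L.toNat - 1) hv' (by omega)
  rw [show (((List.range' 1 (2^L.toNat - 1)).foldl (pvStateStep N.toNat (pvE N G))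
      (pvS2e N.toNat L.toNat (pvE N G) V)).getD v []).getD (2^L.toNat - 1) 0 =
      pvGetS ((List.range' 1 (2^L.toNat - 1)).foldl (pvStateStep N.toNat (pvE N G))
      (pvS2e N.toNat L.toNat (pvE N G) V)) v (2^L.toNat - 1) from rfl, hgoal]
  unfold pvTarget
  by_cases h0 : 2^L.toNat - 1 = 0
  · rw [if_pos h0, h0, pvS, if_pos rfl]
  · rw [if_neg h0, if_pos (le_refl _)]
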